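-- pv_equiv track=rewrite | github.com/itay-raveh/wanderbound | backend/src/app/models/polarsteps.py | _calculate_visual_length
-- ===== SOURCE A (Python) =====
-- import math
--
-- def _calculate_visual_length(text: str) -> int:
--     """Calculate visual length by simulating line wrapping.
--
--     Returns estimated character consumption (lines * _WIDTH).
--     """
--     if not text:
--         return 0
--
--     lines = 0
--     # Use split('\n') to preserve empty lines from consecutive/trailing newlines
--     for para in text.split("\n"):
--         if not para:
--             lines += 1
--         else:
--             lines += math.ceil(len(para) / _WIDTH)
--
--     return lines * _WIDTH
--
-- _WIDTH = 80
-- ===== SOURCE B (Python) =====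
-- _WIDTH = 80
--
--
-- def _calculate_visual_length(text: str) -> int:
--     """Single left-to-right scan over the characters: count wrapped lines with a
--     column counter instead of splitting into paragraphs and ceil-dividing."""
--     if not text:
--         return 0
--
--     lines = 0
--     col = 0            # characters on the current visual line
--     emitted = False    # current paragraph already closed a line exactly at the wrap point
--     for ch in text:
--         if ch == "\n":
--             if col > 0 or not emitted:
--                 lines += 1
--             col = 0
--             emitted = False
--         else:
--             col += 1
--             if col == _WIDTH:
--                 lines += 1
--                 col = 0
--                 emitted = True
--     if col > 0 or not emitted:
--         lines += 1
--     return lines * _WIDTH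
-- ===== Notes on version B (the rewrite author's own statement) =====
-- stated objective: alternative
-- what changed: Replaces A's split-into-paragraphs pass with per-paragraph ceiling division by a single left-to-right character scan keeping a column counter and a wrap flag.
import Mathlib
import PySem

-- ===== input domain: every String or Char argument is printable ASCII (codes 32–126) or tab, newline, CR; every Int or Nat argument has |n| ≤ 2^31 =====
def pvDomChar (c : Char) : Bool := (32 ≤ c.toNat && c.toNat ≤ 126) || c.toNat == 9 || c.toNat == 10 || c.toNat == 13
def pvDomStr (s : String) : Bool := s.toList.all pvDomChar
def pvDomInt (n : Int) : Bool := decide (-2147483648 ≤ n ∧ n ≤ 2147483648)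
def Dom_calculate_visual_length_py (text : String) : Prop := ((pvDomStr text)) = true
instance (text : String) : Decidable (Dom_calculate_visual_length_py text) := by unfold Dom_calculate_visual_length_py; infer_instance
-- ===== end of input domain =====

-- B replaces A's split-into-paragraphs + ceiling-division pass by a single character
-- scan with a column counter (objective: alternative decomposition, same cost).

-- ===== PORT A =====
-- math.ceil(len(para) / 80): exact integer ceiling division, ported as -((-n) // 80)
-- (exact for every length reached here).
def calculate_visual_length_py (text : String) : Int :=
  if text = "" then 0
  else
    -- text.split("\n"): sep is nonempty, so split? always returns some; getD only totalizes
    let paras := (PySem.Str.split? text "\n").getD []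
    let lines := paras.foldl
      (fun lines para =>
        if para = "" then lines + 1
        else lines + (-(PySem.Int.floordiv (-(PySem.Str.len para)) 80))) (0 : Int)
    lines * 80

-- ===== PORT B =====
-- state: (lines emitted, chars on the current visual line, line already closed at the wrap point)
def pvBStep (st : Int × Int × Bool) (c : Char) : Int × Int × Bool :=
  if c = '\n' then
    ((if 0 < st.2.1 ∨ st.2.2 = false then st.1 + 1 else st.1), 0, false)
  else
    let col := st.2.1 + 1
    if col = 80 then (st.1 + 1, 0, true) else (st.1, col, st.2.2)

-- the final `if col > 0 or not emitted: lines += 1`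
def pvFinish (st : Int × Int × Bool) : Int :=
  if 0 < st.2.1 ∨ st.2.2 = false then st.1 + 1 else st.1

def calculate_visual_length_py_alt (text : String) : Int :=
  if text = "" then 0
  else
    pvFinish (text.toList.foldl pvBStep ((0 : Int), (0 : Int), false)) * 80

-- ===== PRECONDITION & SPEC =====
def Spec_calculate_visual_length_py (text : String) (out : Int) : Prop := out = calculate_visual_length_py_alt text
instance (text : String) (out : Int) : Decidable (Spec_calculate_visual_length_py text out) := by unfold Spec_calculate_visual_length_py; infer_instance

-- ===== CLAIM (what is proved, stated in full; the proofs are below) =====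
def Claim_equal_calculate_visual_length_py : Prop := ∀ (text : String), Dom_calculate_visual_length_py text → Spec_calculate_visual_length_py text (calculate_visual_length_py text)

-- ===== LEMMAS AND PROOFS =====

-- lines a paragraph of k characters occupies: 1 if empty, ⌈k/80⌉ otherwise
def pvPc (k : Nat) : Int := if k = 0 then 1 else (((k + 79) / 80 : Nat) : Int)

-- reference count: lines of `cs` when `k` characters of the current paragraph were already read
def pvCount (k : Nat) : List Char → Int
  | [] => pvPc k
  | c :: cs => if c = '\n' then pvPc k + pvCount 0 cs else pvCount (k + 1) cs

-- structural version of splitOn on a one-char separator, carrying the current piece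
def pvSplit (pre : List Char) : List Char → List (List Char)
  | [] => [pre]
  | c :: cs => if c = '\n' then pre :: pvSplit [] cs else pvSplit (pre ++ [c]) cs

theorem pvGo_spec (fuel : Nat) (l cur : List Char) (acc : List (List Char))
    (h : l.length < fuel) :
    PySem.Chars.splitOn.go ['\n'] fuel l cur acc = acc.reverse ++ pvSplit cur.reverse l := by
  induction fuel generalizing l cur acc with
  | zero => omega
  | succ fuel ih =>
    cases l with
    | nil => simp [PySem.Chars.splitOn.go, pvSplit]
    | cons c rest =>
      by_cases hc : c = '\n'
      · subst hc
        simp only [PySem.Chars.splitOn.go, List.isPrefixOf]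
        rw [if_pos (show ('\n' == '\n' && true) = true from rfl)]
        rw [ih _ [] _ (by simpa using Nat.lt_of_succ_lt_succ h)]
        simp [pvSplit]
      · simp only [PySem.Chars.splitOn.go, List.isPrefixOf]
        rw [if_neg (show ¬ (('\n' == c && true) = true) by
          simp only [Bool.and_true, beq_iff_eq]
          exact fun hh => hc hh.symm)]
        rw [ih _ (c :: cur) _ (by simpa using Nat.lt_of_succ_lt_succ h)]
        conv_rhs => rw [pvSplit]
        rw [if_neg hc]
        simp [List.reverse_cons]

theorem pvSplitOn_eq (cs : List Char) :
    PySem.Chars.splitOn cs ['\n'] = pvSplit [] cs := by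
  unfold PySem.Chars.splitOn
  rw [pvGo_spec (cs.length + 1) cs [] [] (by omega)]
  simp

-- ceiling division: A's -((-k) // 80) equals (k + 79) / 80 on positive k
theorem pvCeil_eq (k : Nat) :
    -(PySem.Int.floordiv (-(k : Int)) 80) = (((k + 79) / 80 : Nat) : Int) := by
  rw [PySem.Int.neg_floordiv_neg_eq_iff_of_pos (by norm_num)]
  constructor <;> push_cast <;> omega

-- A's fold over the split pieces computes pvCount
theorem pvA_fold (cs pre : List Char) (L : Int) :
    (pvSplit pre cs).foldl
      (fun lines para =>
        if para = [] then lines + 1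
        else lines + (-(PySem.Int.floordiv (-(para.length : Int)) 80))) L
      = L + pvCount pre.length cs := by
  induction cs generalizing pre L with
  | nil =>
    simp only [pvSplit, List.foldl, pvCount, pvPc]
    by_cases hp : pre = []
    · simp [hp]
    · rw [if_neg hp, if_neg (by simpa using hp), pvCeil_eq _]
  | cons c cs ih =>
    by_cases hc : c = '\n'
    · subst hc
      rw [show pvSplit pre ('\n' :: cs) = pre :: pvSplit [] cs from by
        conv_lhs => rw [pvSplit]
        rw [if_pos rfl]]
      rw [List.foldl_cons, ih [], show pvCount pre.length ('\n' :: cs)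
          = pvPc pre.length + pvCount 0 cs from by
        conv_lhs => rw [pvCount]
        rw [if_pos rfl]]
      simp only [List.length_nil]
      by_cases hp : pre = []
      · subst hp; simp [pvPc]; ring
      · rw [if_neg hp, pvCeil_eq _]
        rw [show pvPc pre.length = (((pre.length + 79) / 80 : Nat) : Int) from by
          simp [pvPc, hp]]
        ring
    · rw [show pvSplit pre (c :: cs) = pvSplit (pre ++ [c]) cs from by
        conv_lhs => rw [pvSplit]
        rw [if_neg hc]]
      rw [ih (pre ++ [c]) L, show pvCount pre.length (c :: cs)
          = pvCount (pre.length + 1) cs from by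
        conv_lhs => rw [pvCount]
        rw [if_neg hc]]
      simp

-- close-a-paragraph arithmetic: finishing the canonical state adds pvPc k
theorem pvClose (L : Int) (k : Nat) :
    (if 0 < ((k % 80 : Nat) : Int) ∨ (decide (80 ≤ k)) = false
      then L + ((k / 80 : Nat) : Int) + 1 else L + ((k / 80 : Nat) : Int))
    = L + pvPc k := by
  have hiff : (0 < ((k % 80 : Nat) : Int) ∨ (decide (80 ≤ k)) = false)
      ↔ (0 < k % 80 ∨ ¬ 80 ≤ k) := by simp; omega
  unfold pvPc
  by_cases h : 0 < k % 80 ∨ ¬ 80 ≤ k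
  · rw [if_pos (hiff.mpr h)]
    by_cases hk : k = 0
    · subst hk; simp
    · rw [if_neg hk]; push_cast; omega
  · rw [if_neg (fun hh => h (hiff.mp hh))]
    have hk : k ≠ 0 := by omega
    rw [if_neg hk]
    push_cast; omega

theorem pvB_scan (cs : List Char) (L : Int) (k : Nat) :
    pvFinish (cs.foldl pvBStep
      (L + ((k / 80 : Nat) : Int), ((k % 80 : Nat) : Int), decide (80 ≤ k)))
      = L + pvCount k cs := by
  induction cs generalizing L k with
  | nil =>
    simp only [List.foldl_nil, pvFinish, pvCount]
    exact pvClose L k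
  | cons c cs ih =>
    by_cases hc : c = '\n'
    · subst hc
      rw [List.foldl_cons, show pvBStep
            (L + ((k / 80 : Nat) : Int), ((k % 80 : Nat) : Int), decide (80 ≤ k)) '\n'
          = (L + pvPc k, 0, false) from by
        unfold pvBStep
        rw [if_pos rfl, pvClose L k]]
      have h0 := ih (L + pvPc k) 0
      simp only [Nat.zero_div, Nat.zero_mod, Nat.cast_zero, add_zero] at h0
      rw [show decide (80 ≤ 0) = false from rfl] at h0
      rw [h0, show pvCount k ('\n' :: cs) = pvPc k + pvCount 0 cs from by
        conv_lhs => rw [pvCount]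
        rw [if_pos rfl]]
      ring
    · rw [List.foldl_cons, show pvBStep
            (L + ((k / 80 : Nat) : Int), ((k % 80 : Nat) : Int), decide (80 ≤ k)) c
          = (L + (((k + 1) / 80 : Nat) : Int), (((k + 1) % 80 : Nat) : Int),
              decide (80 ≤ k + 1)) from by
        unfold pvBStep
        rw [if_neg hc]
        by_cases h79 : k % 80 = 79
        · rw [if_pos (show ((k % 80 : Nat) : Int) + 1 = 80 by rw [h79]; norm_num)]
          refine Prod.ext ?_ (Prod.ext ?_ ?_) <;> simp only
          · push_cast; omega
          · push_cast; omega
          · symm; rw [decide_eq_true_eq]; omega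
        · rw [if_neg (show ¬ (((k % 80 : Nat) : Int) + 1 = 80) by
            intro hh
            exact h79 (by exact_mod_cast (by omega : ((k % 80 : Nat) : Int) = 79)))]
          refine Prod.ext ?_ (Prod.ext ?_ ?_) <;> simp only
          · push_cast; omega
          · push_cast; omega
          · rw [decide_eq_decide]; omega]
      rw [ih L (k + 1), show pvCount k (c :: cs) = pvCount (k + 1) cs from by
        conv_lhs => rw [pvCount]
        rw [if_neg hc]]

-- the String-level fold of port A is the List-Char-level fold of pvA_fold
theorem pvA_fold_str (l : List (List Char)) (L : Int) :
    (l.map String.ofList).foldl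
      (fun lines para =>
        if para = "" then lines + 1
        else lines + (-(PySem.Int.floordiv (-(PySem.Str.len para)) 80))) L
    = l.foldl
      (fun lines para =>
        if para = [] then lines + 1
        else lines + (-(PySem.Int.floordiv (-(para.length : Int)) 80))) L := by
  induction l generalizing L with
  | nil => rfl
  | cons p l ih =>
    simp only [List.map_cons, List.foldl_cons, PySem.Str.len_eq, String.toList_ofList]
    by_cases hp : p = []
    · subst hp
      rw [if_pos (by rfl), if_pos rfl]
      exact ih _
    · rw [if_neg (fun h => hp (by simpa using congrArg String.toList h)), if_neg hp]
      exact ih _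

-- ===== VERDICT (by name: the statement is the Claim_ definition above) =====
theorem calculate_visual_length_py_spec : Claim_equal_calculate_visual_length_py := by
  intro text _
  unfold Spec_calculate_visual_length_py calculate_visual_length_py calculate_visual_length_py_alt
  by_cases ht : text = ""
  · simp [ht]
  · rw [if_neg ht, if_neg ht]
    have hsplit : PySem.Str.split? text "\n"
        = some ((pvSplit [] text.toList).map String.ofList) := by
      unfold PySem.Str.split? PySem.Chars.split?
      rw [show ("\n".toList) = ['\n'] from by decide]
      simp [pvSplitOn_eq]
    rw [hsplit]
    simp only [Option.getD_some]
    rw [pvA_fold_str, pvA_fold text.toList [] 0]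
    have hB := pvB_scan text.toList 0 0
    simp only [Nat.zero_div, Nat.zero_mod, Nat.cast_zero, add_zero] at hB
    rw [show decide (80 ≤ 0) = false from rfl] at hB
    rw [hB]
    simp
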